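-- pv_equiv track=rewrite | github.com/subakarank/leetcode | find_common_elements.py | intersection_elements_
-- ===== SOURCE A (Python) =====
-- def intersection_elements_(nums1: list, nums2: list):
--     counts = [0,0]
--     set_nums2 = set(nums2)
--     set_nums1 = set(nums1)
--
--     for num in nums1:
--         if num in set_nums2:
--             counts[0] += 1
--     for num in nums2:
--         if num in set_nums1:
--             counts[1] += 1
--     return counts
-- ===== SOURCE B (Python) =====
-- def intersection_elements_(nums1: list, nums2: list):
--     c1 = {}
--     for x in nums1:
--         c1[x] = c1.get(x, 0) + 1
--     c2 = {}
--     for x in nums2: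
--         c2[x] = c2.get(x, 0) + 1
--     t1 = 0
--     t2 = 0
--     for k in c1:
--         if k in c2:
--             t1 += c1[k]
--             t2 += c2[k]
--     return [t1, t2]
-- ===== Notes on version B (the rewrite author's own statement) =====
-- stated objective: alternative
-- what changed: B builds frequency dictionaries of both lists once and sums multiplicities over the distinct common keys in one loop, instead of A's two full-list scans with set-membership tests.
import Mathlib
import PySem

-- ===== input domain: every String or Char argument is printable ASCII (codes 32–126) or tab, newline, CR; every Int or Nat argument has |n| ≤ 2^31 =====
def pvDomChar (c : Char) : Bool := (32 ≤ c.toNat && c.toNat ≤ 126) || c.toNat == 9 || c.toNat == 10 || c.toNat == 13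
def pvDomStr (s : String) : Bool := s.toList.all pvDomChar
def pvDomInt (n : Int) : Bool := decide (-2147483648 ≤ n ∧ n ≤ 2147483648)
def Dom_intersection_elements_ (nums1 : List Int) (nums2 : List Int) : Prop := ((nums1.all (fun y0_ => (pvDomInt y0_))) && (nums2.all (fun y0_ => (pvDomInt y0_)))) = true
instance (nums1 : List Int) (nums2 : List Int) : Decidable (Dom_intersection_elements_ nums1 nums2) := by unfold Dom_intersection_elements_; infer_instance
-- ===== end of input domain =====

-- B sums multiplicities over the distinct common keys of two frequency dictionaries,
-- instead of A's two full-list scans with set-membership tests (objective: alternative).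

-- ===== PORT A =====
def intersection_elements_ (nums1 : List Int) (nums2 : List Int) : List Int :=
  let set_nums2 : PySem.Set Int := PySem.Set.ofList nums2
  let set_nums1 : PySem.Set Int := PySem.Set.ofList nums1
  let c0 : Int := nums1.foldl (fun c num => if set_nums2.contains num then c + 1 else c) 0
  let c1 : Int := nums2.foldl (fun c num => if set_nums1.contains num then c + 1 else c) 0
  [c0, c1]

-- ===== PORT B =====
-- a hand-written counting loop: c[x] = c.get(x, 0) + 1
def pvCounterOf (xs : List Int) : PySem.Dict Int Int :=
  xs.foldl (fun d x => d.insert x (d.getD x 0 + 1)) PySem.Dict.empty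

def intersection_elements__alt (nums1 : List Int) (nums2 : List Int) : List Int :=
  let c1 := pvCounterOf nums1
  let c2 := pvCounterOf nums2
  let p : Int × Int := c1.keys.foldl
    (fun p k => if c2.contains k then (p.1 + c1.getD k 0, p.2 + c2.getD k 0) else p)
    (0, 0)
  [p.1, p.2]

-- ===== PRECONDITION & SPEC =====
def Spec_intersection_elements_ (nums1 : List Int) (nums2 : List Int) (out : List Int) : Prop := out = intersection_elements__alt nums1 nums2
instance (nums1 : List Int) (nums2 : List Int) (out : List Int) : Decidable (Spec_intersection_elements_ nums1 nums2 out) := by unfold Spec_intersection_elements_; infer_instance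

-- ===== CLAIM (what is proved, stated in full; the proofs are below) =====
def Claim_equal_intersection_elements_ : Prop := ∀ (nums1 : List Int) (nums2 : List Int), Dom_intersection_elements_ nums1 nums2 → Spec_intersection_elements_ nums1 nums2 (intersection_elements_ nums1 nums2)

-- ===== LEMMAS AND PROOFS =====

-- the pair fold of B splits into two independent scalar folds
theorem pv_pair_foldl (q : Int → Bool) (f g : Int → Int) (ks : List Int) (a b : Int) :
    ks.foldl (fun p k => if q k then (p.1 + f k, p.2 + g k) else p) (a, b)
      = (ks.foldl (fun s k => if q k then s + f k else s) a,
         ks.foldl (fun s k => if q k then s + g k else s) b) := by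
  induction ks generalizing a b with
  | nil => rfl
  | cons k ks ih =>
    simp only [List.foldl_cons]
    by_cases h : q k = true <;> simp [h, ih]

theorem pv_foldl_if_add (q : Int → Bool) (f : Int → Int) (ks : List Int) (a : Int) :
    ks.foldl (fun s k => if q k then s + f k else s) a
      = a + ((ks.filter q).map f).sum := by
  induction ks generalizing a with
  | nil => simp
  | cons k ks ih =>
    by_cases h : q k = true <;> simp [h, ih, add_assoc]

-- summing multiplicities over the distinct elements of l satisfying q counts l's elements satisfying q
theorem pv_sum_counts (l : List Int) (q : Int → Bool) :
    (((PySem.List.dedup l).filter q).map (fun k => (l.count k : Int))).sum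
      = (l.countP q : Int) := by
  have hperm : (PySem.List.dedup l).Perm l.dedup := by
    apply (List.perm_ext_iff_of_nodup (PySem.List.nodup_dedup l) l.nodup_dedup).2
    intro a
    rw [PySem.List.mem_dedup, List.mem_dedup]
  rw [((hperm.filter q).map (fun k => (l.count k : Int))).sum_eq]
  rw [show ((l.dedup.filter q).map (fun k => (l.count k : Int))).sum
        = (((l.dedup.filter q).map fun x => l.count x).sum : Int) by
      induction (l.dedup.filter q) with
      | nil => simp
      | cons x xs ih => simp [ih]]
  rw [List.sum_map_count_dedup_filter_eq_countP q l]

-- the distinct common elements of l and m, from l's side or from m's side, are the same set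
theorem pv_common_perm (l m : List Int) :
    ((PySem.List.dedup l).filter (fun k => m.contains k)).Perm
      ((PySem.List.dedup m).filter (fun k => l.contains k)) := by
  apply (List.perm_ext_iff_of_nodup
      ((PySem.List.nodup_dedup l).filter _) ((PySem.List.nodup_dedup m).filter _)).2
  intro a
  simp only [List.mem_filter, PySem.List.mem_dedup, List.contains_iff_mem]
  tauto

-- ===== VERDICT (by name: the statement is the Claim_ definition above) =====
theorem intersection_elements__spec : Claim_equal_intersection_elements_ := by
  intro nums1 nums2 _
  show intersection_elements_ nums1 nums2 = intersection_elements__alt nums1 nums2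
  unfold intersection_elements_ intersection_elements__alt pvCounterOf
  rw [PySem.Dict.foldl_insert_getD_add_one_eq_counter,
      PySem.Dict.foldl_insert_getD_add_one_eq_counter]
  simp only [PySem.Dict.keys_counter, ← PySem.List.dedup_eq_ofList]
  rw [pv_pair_foldl (fun k => (PySem.Dict.counter nums2).contains k)
        (fun k => (PySem.Dict.counter nums1).getD k 0)
        (fun k => (PySem.Dict.counter nums2).getD k 0)]
  simp only [pv_foldl_if_add, PySem.Dict.contains_counter, PySem.Dict.getD_counter]
  rw [pv_sum_counts nums1 (fun k => nums2.contains k)]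
  rw [((pv_common_perm nums1 nums2).map (fun k => (nums2.count k : Int))).sum_eq]
  rw [pv_sum_counts nums2 (fun k => nums1.contains k)]
  simp [PySem.List.foldl_ite_add_one]
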